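-- pv_equiv track=rewrite | github.com/michaelzhang0628/mz | python/owls.py | owl_count
-- ===== SOURCE A (Python) =====
-- def owl_count(text):
--     period_list = text.split(".")
--     count = 0
--     for item in period_list:
--         question_mark_list = item.split("?")
--         for smaller_item in question_mark_list:
--             if "owl" in smaller_item.lower():
--                 count += 1
--     return count
-- ===== SOURCE B (Python) =====
-- def owl_count(text):
--     count = 0
--     seg = []
--     for ch in text:
--         if ch == "." or ch == "?":
--             if "owl" in "".join(seg).lower():
--                 count += 1
--             seg = []
--         else:
--             seg.append(ch)
--     if "owl" in "".join(seg).lower():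
--         count += 1
--     return count
-- ===== Notes on version B (the rewrite author's own statement) =====
-- stated objective: alternative
-- what changed: Replaces A's nested split-on-period-then-split-on-question-mark double loop with a single left-to-right character scan that accumulates the current segment and counts it when a delimiter or the end of the text is reached.
import Mathlib
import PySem

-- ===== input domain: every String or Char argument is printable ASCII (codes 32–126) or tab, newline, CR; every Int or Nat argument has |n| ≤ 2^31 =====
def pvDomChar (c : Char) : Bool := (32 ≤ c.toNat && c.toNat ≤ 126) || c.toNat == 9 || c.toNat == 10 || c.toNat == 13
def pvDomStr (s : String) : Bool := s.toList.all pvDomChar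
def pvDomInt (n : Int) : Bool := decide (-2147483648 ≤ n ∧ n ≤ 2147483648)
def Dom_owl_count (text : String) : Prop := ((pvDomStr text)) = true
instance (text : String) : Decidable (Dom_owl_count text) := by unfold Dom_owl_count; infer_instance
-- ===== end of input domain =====

-- B replaces A's split-on-period-then-split-on-question-mark nested loops with a single left-to-right
-- character scan that accumulates the current segment and counts it at each delimiter / at the end
-- (objective: alternative — same O(n) cost, genuinely different traversal).

-- ===== PORT A =====
def owl_count (text : String) : Int :=
  let period_list := PySem.Chars.splitOn text.toList ['.']
  period_list.foldl (fun count item =>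
    let question_mark_list := PySem.Chars.splitOn item ['?']
    question_mark_list.foldl (fun c smaller_item =>
      if PySem.Chars.isIn ['o', 'w', 'l'] (PySem.Chars.lower smaller_item) then c + 1 else c)
      count) 0

-- ===== PORT B =====
def owl_count_alt (text : String) : Int :=
  let st := text.toList.foldl (fun (st : Int × List Char) ch =>
    if ch = '.' ∨ ch = '?' then
      ((if PySem.Chars.isIn ['o', 'w', 'l'] (PySem.Chars.lower st.2) then st.1 + 1 else st.1), [])
    else (st.1, st.2 ++ [ch])) (0, [])
  if PySem.Chars.isIn ['o', 'w', 'l'] (PySem.Chars.lower st.2) then st.1 + 1 else st.1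

-- ===== PRECONDITION & SPEC =====
def Spec_owl_count (text : String) (out : Int) : Prop := out = owl_count_alt text
instance (text : String) (out : Int) : Decidable (Spec_owl_count text out) := by unfold Spec_owl_count; infer_instance

-- ===== CLAIM (what is proved, stated in full; the proofs are below) =====
def Claim_equal_owl_count : Prop := ∀ (text : String), Dom_owl_count text → Spec_owl_count text (owl_count text)

-- ===== LEMMAS AND PROOFS =====

-- segment predicate: "owl" in seg.lower()
def owlP (s : List Char) : Bool :=
  PySem.Chars.isIn ['o', 'w', 'l'] (PySem.Chars.lower s)

-- prepend a prefix to the first segment of a segment list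
def consHead (p : List Char) : List (List Char) → List (List Char)
  | [] => [p]
  | h :: t => (p ++ h) :: t

-- structural single-character split (Python str.split on a one-char separator)
def segs (d : Char) : List Char → List (List Char)
  | [] => [[]]
  | c :: cs => if c = d then [] :: segs d cs else consHead [c] (segs d cs)

-- structural split on BOTH delimiters (period and question mark) at once
def msegs : List Char → List (List Char)
  | [] => [[]]
  | c :: cs => if c = '.' ∨ c = '?' then [] :: msegs cs else consHead [c] (msegs cs)

theorem consHead_ne_nil (p : List Char) (xs : List (List Char)) : consHead p xs ≠ [] := by
  cases xs <;> simp [consHead]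

theorem segs_ne_nil (d : Char) (cs : List Char) : segs d cs ≠ [] := by
  cases cs with
  | nil => simp [segs]
  | cons c cs => by_cases h : c = d <;> simp [segs, h, consHead_ne_nil]

theorem msegs_ne_nil (cs : List Char) : msegs cs ≠ [] := by
  cases cs with
  | nil => simp [msegs]
  | cons c cs => by_cases h : c = '.' ∨ c = '?' <;> simp [msegs, h, consHead_ne_nil]

theorem consHead_nil (xs : List (List Char)) (h : xs ≠ []) : consHead [] xs = xs := by
  cases xs <;> simp_all [consHead]

theorem consHead_consHead (p q : List Char) (xs : List (List Char)) :
    consHead p (consHead q xs) = consHead (p ++ q) xs := by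
  cases xs <;> simp [consHead]

theorem go_eq (d : Char) (fuel : Nat) : ∀ (l cur : List Char) (acc : List (List Char)),
    l.length < fuel →
    PySem.Chars.splitOn.go [d] fuel l cur acc = acc.reverse ++ consHead cur.reverse (segs d l) := by
  induction fuel with
  | zero => intro l cur acc h; omega
  | succ n ih =>
    intro l cur acc h
    cases l with
    | nil => simp [PySem.Chars.splitOn.go, segs, consHead]
    | cons c rest =>
      rw [PySem.Chars.splitOn.go]
      by_cases hc : c = d
      · simp only [List.isPrefixOf, hc, beq_self_eq_true, Bool.true_and,
          if_pos, List.length_cons, List.drop_succ_cons, List.length_nil, List.drop_zero]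
        rw [ih rest [] _ (by simpa using Nat.lt_of_succ_lt_succ h)]
        simp only [segs, if_pos, consHead,
          List.reverse_nil, List.reverse_cons, List.append_assoc, List.singleton_append]
        cases hs : segs d rest with
        | nil => exact absurd hs (segs_ne_nil d rest)
        | cons a b => simp
      · have hp : ([d].isPrefixOf (c :: rest)) = false := by
          simp [List.isPrefixOf, Ne.symm hc]
        simp only [hp, Bool.false_eq_true, if_neg, not_false_iff]
        rw [ih rest (c :: cur) acc (by simpa using Nat.lt_of_succ_lt_succ h)]
        simp [segs, hc, consHead_consHead, List.reverse_cons]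

theorem splitOn_eq_segs (d : Char) (l : List Char) :
    PySem.Chars.splitOn l [d] = segs d l := by
  rw [PySem.Chars.splitOn, go_eq d (l.length + 1) l [] [] (by omega)]
  simp [consHead_nil _ (segs_ne_nil d l)]

-- flattening the nested period-then-question-mark split gives the two-delimiter split
theorem flatMap_segs (cs : List Char) :
    (segs '.' cs).flatMap (segs '?') = msegs cs := by
  induction cs with
  | nil => simp [segs, msegs]
  | cons c cs ih =>
    by_cases hd : c = '.'
    · simp only [segs, hd, if_pos, List.flatMap_cons, msegs, true_or]
      simpa [segs] using ih
    · cases hs : segs '.' cs with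
      | nil => exact absurd hs (segs_ne_nil '.' cs)
      | cons hseg t =>
        by_cases hq : c = '?'
        · simp only [segs, hd, if_neg, not_false_iff, hs, consHead, List.flatMap_cons,
            List.singleton_append, hq, if_pos, msegs, or_true]
          rw [← ih, hs]
          simp [segs, List.flatMap_cons]
        · have hm : ¬ (c = '.' ∨ c = '?') := by tauto
          simp only [segs, hd, if_neg, not_false_iff, hs, consHead, List.flatMap_cons,
            List.singleton_append, hq, msegs, hm]
          rw [← ih, hs]
          simp only [List.flatMap_cons]
          cases hs2 : segs '?' hseg with
          | nil => exact absurd hs2 (segs_ne_nil '?' hseg)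
          | cons a b => simp [consHead]

-- Int-valued count of segments satisfying owlP
def icount (xs : List (List Char)) : Int := (xs.countP owlP : Nat)

theorem foldl_icount (xs : List (List Char)) (c : Int) :
    xs.foldl (fun a s => if owlP s then a + 1 else a) c = c + icount xs := by
  induction xs generalizing c with
  | nil => simp [icount]
  | cons x xs ih =>
    by_cases h : owlP x
    · simp only [List.foldl_cons, h, if_pos, ih, icount, List.countP_cons, h]
      push_cast
      ring
    · simp only [List.foldl_cons, h, Bool.false_eq_true, if_neg, not_false_iff, ih,
        icount, List.countP_cons, h]
      simp

theorem nested_foldl_icount (xs : List (List Char)) (c : Int) :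
    xs.foldl (fun count item =>
      (segs '?' item).foldl (fun a s => if owlP s then a + 1 else a) count) c
      = c + icount (xs.flatMap (segs '?')) := by
  induction xs generalizing c with
  | nil => simp [icount]
  | cons x xs ih =>
    rw [List.foldl_cons, foldl_icount, ih]
    simp only [icount, List.flatMap_cons, List.countP_append]
    push_cast
    ring

-- the one-pass scan counts the two-delimiter segments, with the open segment prepended
theorem scan_invariant (cs : List Char) : ∀ (k : Int) (seg : List Char),
    (if owlP (cs.foldl (fun (st : Int × List Char) ch =>
        if ch = '.' ∨ ch = '?' then
          ((if owlP st.2 then st.1 + 1 else st.1), [])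
        else (st.1, st.2 ++ [ch])) (k, seg)).2
      then (cs.foldl (fun (st : Int × List Char) ch =>
        if ch = '.' ∨ ch = '?' then
          ((if owlP st.2 then st.1 + 1 else st.1), [])
        else (st.1, st.2 ++ [ch])) (k, seg)).1 + 1
      else (cs.foldl (fun (st : Int × List Char) ch =>
        if ch = '.' ∨ ch = '?' then
          ((if owlP st.2 then st.1 + 1 else st.1), [])
        else (st.1, st.2 ++ [ch])) (k, seg)).1)
      = k + icount (consHead seg (msegs cs)) := by
  induction cs with
  | nil =>
    intro k seg
    simp only [List.foldl_nil, msegs, consHead, List.append_nil, icount, List.countP_cons,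
      List.countP_nil]
    by_cases h : owlP seg <;> simp [h]
  | cons c cs ih =>
    intro k seg
    by_cases h : c = '.' ∨ c = '?'
    · simp only [List.foldl_cons, h, if_pos]
      rw [ih, consHead_nil _ (msegs_ne_nil cs)]
      have hm : msegs (c :: cs) = [] :: msegs cs := by simp [msegs, h]
      rw [hm]
      simp only [consHead, List.append_nil, icount, List.countP_cons]
      by_cases hp : owlP seg <;> simp [hp] <;> push_cast <;> ring
    · simp only [List.foldl_cons, h, if_neg, not_false_iff]
      rw [ih]
      have hm : msegs (c :: cs) = consHead [c] (msegs cs) := by simp [msegs, h]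
      rw [hm, consHead_consHead]

theorem owl_count_A (text : String) : owl_count text = icount (msegs text.toList) := by
  unfold owl_count
  simp only [← owlP.eq_def, splitOn_eq_segs]
  have h := nested_foldl_icount (segs '.' text.toList) 0
  rw [flatMap_segs] at h
  simpa using h

theorem owl_count_B (text : String) : owl_count_alt text = icount (msegs text.toList) := by
  unfold owl_count_alt
  simp only [← owlP.eq_def]
  have h := scan_invariant text.toList 0 []
  rw [consHead_nil _ (msegs_ne_nil text.toList)] at h
  simpa using h

-- ===== VERDICT (by name: the statement is the Claim_ definition above) =====
theorem owl_count_spec : Claim_equal_owl_count := by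
  intro text _
  unfold Spec_owl_count
  rw [owl_count_A, owl_count_B]
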